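-- pv_equiv track=rewrite | github.com/TgDSML/DCOP-graph-coloring | src/dcop/adopt.py | build_pseudotree
-- ===== SOURCE A (Python) =====
-- def get_neighbors(node, edges):
--     nbrs = []
--     for u, v in edges:
--         if u == node: nbrs.append(v)
--         elif v == node: nbrs.append(u)
--     return nbrs
--
-- def build_pseudotree(nodes, edges, root):
--     parent = {n: None for n in nodes}
--     children = {n: [] for n in nodes}
--     pseudo_parents = {n: [] for n in nodes}
--     pseudo_children = {n: [] for n in nodes}
--
--     visited = set()
--
--     def dfs(u, p):
--         visited.add(u)
--
--         # Tree Edges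
--         if p is not None:
--             parent[u] = p
--             children[p].append(u)
--
--         for v in get_neighbors(u, edges):
--             if v == p:
--                 continue
--
--             if v in visited:
--                 # Back-edges (Πρόγονοι)
--                 if v not in pseudo_parents[u]:
--                     pseudo_parents[u].append(v)
--                     pseudo_children[v].append(u) # Σημαντικό για την επικοινωνία
--             else:
--                 dfs(v, u)
--
--     dfs(root, None)
--     return parent, children, pseudo_parents, pseudo_children
-- ===== SOURCE B (Python) =====
-- def build_pseudotree(nodes, edges, root):
--     parent = {n: None for n in nodes}
--     children = {n: [] for n in nodes}
--     pseudo_parents = {n: [] for n in nodes}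
--     pseudo_children = {n: [] for n in nodes}
--
--     # adjacency index built once, preserving edge order (= get_neighbors order)
--     adj = {}
--     for u, v in edges:
--         adj.setdefault(u, []).append(v)
--         if v != u:
--             adj.setdefault(v, []).append(u)
--
--     visited = {root}
--     # iterative DFS: stack of (vertex, its tree parent, iterator over its neighbors)
--     stack = [(root, None, iter(adj.get(root, [])))]
--     while stack:
--         u, p, it = stack[-1]
--         for v in it:
--             if v == p:
--                 continue
--             if v in visited:
--                 pp = pseudo_parents[u]
--                 if v not in pp:
--                     pp.append(v)
--                     pseudo_children[v].append(u)
--             else: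
--                 visited.add(v)
--                 parent[v] = u
--                 children[u].append(v)
--                 stack.append((v, u, iter(adj.get(v, []))))
--                 break
--         else:
--             stack.pop()
--     return parent, children, pseudo_parents, pseudo_children
-- ===== Notes on version B (the rewrite author's own statement) =====
-- stated objective: alternative
-- what changed: A rescans the whole edge list at every visited vertex (get_neighbors inside a recursive dfs); B builds an adjacency index once in edge order and traverses it with an iterative explicit-stack DFS instead of recursion.
-- outside the precondition, e.g. on build_pseudotree([1], [(1, 2), (2, 3)], 1): A raises KeyError, B raises KeyError
import Mathlib
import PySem

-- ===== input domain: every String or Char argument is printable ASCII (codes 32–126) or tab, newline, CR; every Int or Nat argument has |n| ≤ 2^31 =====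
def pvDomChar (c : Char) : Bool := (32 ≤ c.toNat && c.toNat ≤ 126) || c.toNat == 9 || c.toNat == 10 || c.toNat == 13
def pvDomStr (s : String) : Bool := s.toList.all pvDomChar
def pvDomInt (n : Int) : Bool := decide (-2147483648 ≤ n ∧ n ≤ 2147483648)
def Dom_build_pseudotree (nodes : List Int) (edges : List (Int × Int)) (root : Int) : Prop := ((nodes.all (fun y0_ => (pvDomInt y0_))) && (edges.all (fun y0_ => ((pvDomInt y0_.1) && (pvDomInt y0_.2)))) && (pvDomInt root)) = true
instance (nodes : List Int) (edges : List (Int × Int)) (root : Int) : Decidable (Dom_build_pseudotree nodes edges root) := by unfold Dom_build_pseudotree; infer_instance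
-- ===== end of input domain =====

-- B replaces A's per-vertex rescan of the whole edge list (get_neighbors inside a recursive dfs)
-- by an adjacency index built once in edge order plus an iterative explicit-stack DFS.

-- Shared mutable state of both Pythons: the four result dicts and the visited set.
structure PTSt where
  par : PySem.Dict Int (Option Int)
  chl : PySem.Dict Int (List Int)
  pp  : PySem.Dict Int (List Int)
  pc  : PySem.Dict Int (List Int)
  vis : PySem.Set Int

-- ===== PORT A =====
def get_neighbors (node : Int) (edges : List (Int × Int)) : List Int :=
  edges.foldl (fun nbrs uv =>
    if uv.1 = node then nbrs ++ [uv.2]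
    else if uv.2 = node then nbrs ++ [uv.1]
    else nbrs) []

-- A's recursive dfs. `g` is fuel bounding the recursion depth (totality device only: the
-- top-level call passes more fuel than any reachable depth). outer `none` = fuel exhausted
-- (never reached from build_pseudotree); `some none` = Python raises KeyError; `some (some S)` = normal return.
mutual
def dfsA (edges : List (Int × Int)) (g : Nat) (u : Int) (p : Option Int) (S : PTSt) : Option (Option PTSt) :=
  match g with
  | 0 => none
  | Nat.succ g' =>
    let S1 : PTSt := { S with vis := S.vis.add u }
    match p with
    | none => loopA edges g' u p (get_neighbors u edges) S1
    | some pv =>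
      let S2 : PTSt := { S1 with par := S1.par.insert u (some pv) }
      match S2.chl.get? pv with
      | none => some none                    -- Python: KeyError in children[p].append(u)
      | some l => loopA edges g' u p (get_neighbors u edges) { S2 with chl := S2.chl.insert pv (l ++ [u]) }
termination_by (g, 0)

def loopA (edges : List (Int × Int)) (g : Nat) (u : Int) (p : Option Int) (vs : List Int) (S : PTSt) : Option (Option PTSt) :=
  match vs with
  | [] => some (some S)
  | v :: vs' =>
    if some v = p then loopA edges g u p vs' S
    else if S.vis.contains v then
      match S.pp.get? u with
      | none => some none                    -- Python: KeyError in pseudo_parents[u]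
      | some l =>
        if v ∈ l then loopA edges g u p vs' S
        else
          match S.pc.get? v with
          | none => some none                -- Python: KeyError in pseudo_children[v]
          | some m => loopA edges g u p vs' { S with pp := S.pp.insert u (l ++ [v]), pc := S.pc.insert v (m ++ [u]) }
    else
      match dfsA edges g v (some u) S with
      | none => none
      | some none => some none
      | some (some S') => loopA edges g u p vs' S'
termination_by (g, vs.length + 1)
end

def build_pseudotree (nodes : List Int) (edges : List (Int × Int)) (root : Int) : (List (Int × Option Int)) × (List (Int × List Int)) × (List (Int × List Int)) × (List (Int × List Int)) :=
  let par0 : PySem.Dict Int (Option Int) := nodes.foldl (fun d n => d.insert n none) PySem.Dict.empty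
  let chl0 : PySem.Dict Int (List Int) := nodes.foldl (fun d n => d.insert n []) PySem.Dict.empty
  let pp0 : PySem.Dict Int (List Int) := nodes.foldl (fun d n => d.insert n []) PySem.Dict.empty
  let pc0 : PySem.Dict Int (List Int) := nodes.foldl (fun d n => d.insert n []) PySem.Dict.empty
  -- fuel strictly above any reachable recursion depth (each dfs level visits a fresh vertex)
  match dfsA edges (nodes.length + 2 * edges.length + 1) root none ⟨par0, chl0, pp0, pc0, PySem.Set.empty⟩ with
  | some (some S) => (S.par.items, S.chl.items, S.pp.items, S.pc.items)
  | _ => ([], [], [], [])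

-- ===== PORT B =====
-- adjacency index built once, preserving edge order (adj.setdefault(u, []).append(v) = Dict.modify)
def buildAdj (edges : List (Int × Int)) : PySem.Dict Int (List Int) :=
  edges.foldl (fun d uv =>
    let d1 := d.modify uv.1 [] (· ++ [uv.2])
    if uv.2 ≠ uv.1 then d1.modify uv.2 [] (· ++ [uv.1]) else d1) PySem.Dict.empty

-- proof-side vertex universe (termination guard of runB only; never affects the computed value)
def candidates (edges : List (Int × Int)) (root : Int) : List Int :=
  root :: edges.flatMap (fun uv => [uv.1, uv.2])

def freshCount (cands : List Int) (vis : PySem.Set Int) : Nat :=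
  cands.countP (fun c => decide (c ∉ vis))

lemma freshCount_add_lt (cands : List Int) (vis : PySem.Set Int) (v : Int)
    (hc : v ∈ cands) (hv : v ∉ vis) :
    freshCount cands (vis.add v) < freshCount cands vis := by
  have hpoint : ∀ x : Int, x ∉ vis.add v → x ∉ vis := by
    intro x hx hmem; exact hx ((PySem.Set.mem_add vis v x).mpr (Or.inl hmem))
  induction cands with
  | nil => cases hc
  | cons c cs ih =>
    have htail : cs.countP (fun c => decide (c ∉ vis.add v)) ≤ cs.countP (fun c => decide (c ∉ vis)) := by
      apply List.countP_mono_left; intro x _ hx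
      simpa using hpoint x (by simpa using hx)
    simp only [freshCount, List.countP_cons] at ih ⊢
    rcases List.mem_cons.mp hc with h | h
    · have h1 : decide (c ∉ vis.add v) = false := by
        subst h; simp [PySem.Set.mem_add]
      have h2 : decide (c ∉ vis) = true := by subst h; simp [hv]
      simp only [h1, h2]
      simp only [Bool.false_eq_true, if_false, if_true]
      omega
    · have hlt := ih h
      have himp : decide (c ∉ vis.add v) = true → decide (c ∉ vis) = true := by
        intro h1; simpa using hpoint c (by simpa using h1)
      have hhead : (if decide (c ∉ vis.add v) = true then 1 else 0) ≤ (if decide (c ∉ vis) = true then 1 else 0) := by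
        by_cases hA : decide (c ∉ vis.add v) = true
        · rw [if_pos hA, if_pos (himp hA)]
        · rw [if_neg hA]; exact Nat.zero_le _
      omega

-- B's iterative DFS: stack of (vertex, tree parent, remaining neighbour iterator).
def runB (edges : List (Int × Int)) (cands : List Int) (stack : List (Int × Option Int × List Int)) (S : PTSt) : Option PTSt :=
  match stack with
  | [] => some S
  | (u, p, vs) :: rest =>
    match vs with
    | [] => runB edges cands rest S                      -- iterator exhausted: stack.pop()
    | v :: vs' =>
      if some v = p then runB edges cands ((u, p, vs') :: rest) S
      else if S.vis.contains v then
        match S.pp.get? u with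
        | none => none                                   -- Python: KeyError in pseudo_parents[u]
        | some l =>
          if v ∈ l then runB edges cands ((u, p, vs') :: rest) S
          else
            match S.pc.get? v with
            | none => none                               -- Python: KeyError in pseudo_children[v]
            | some m => runB edges cands ((u, p, vs') :: rest) { S with pp := S.pp.insert u (l ++ [v]), pc := S.pc.insert v (m ++ [u]) }
      else if hv : v ∈ cands then                        -- totality guard: every pushed neighbour is an edge endpoint, hence ∈ cands
        let S1 : PTSt := { S with vis := S.vis.add v }
        let S2 : PTSt := { S1 with par := S1.par.insert v (some u) }
        match S2.chl.get? u with
        | none => none                                   -- Python: KeyError in children[u].append(v)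
        | some l => runB edges cands ((v, some u, (buildAdj edges).getD v []) :: (u, p, vs') :: rest) { S2 with chl := S2.chl.insert u (l ++ [v]) }
      else runB edges cands ((u, p, vs') :: rest) S      -- unreachable branch of the totality guard
termination_by (freshCount cands S.vis, (stack.map (fun e => e.2.2.length + 1)).sum)
decreasing_by
  all_goals simp_wf
  all_goals first
    | (apply Prod.Lex.right; simp; all_goals omega)
    | (apply Prod.Lex.left;
       exact freshCount_add_lt cands S.vis v hv
         (by simpa [PySem.Set.contains] using ‹¬ (S.vis.contains v = true)›))

def build_pseudotree_alt (nodes : List Int) (edges : List (Int × Int)) (root : Int) : (List (Int × Option Int)) × (List (Int × List Int)) × (List (Int × List Int)) × (List (Int × List Int)) :=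
  let par0 : PySem.Dict Int (Option Int) := nodes.foldl (fun d n => d.insert n none) PySem.Dict.empty
  let chl0 : PySem.Dict Int (List Int) := nodes.foldl (fun d n => d.insert n []) PySem.Dict.empty
  let pp0 : PySem.Dict Int (List Int) := nodes.foldl (fun d n => d.insert n []) PySem.Dict.empty
  let pc0 : PySem.Dict Int (List Int) := nodes.foldl (fun d n => d.insert n []) PySem.Dict.empty
  match runB edges (candidates edges root) [(root, none, (buildAdj edges).getD root [])]
      ⟨par0, chl0, pp0, pc0, PySem.Set.ofList [root]⟩ with
  | some S => (S.par.items, S.chl.items, S.pp.items, S.pc.items)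
  | none => ([], [], [], [])

-- ===== PRECONDITION & SPEC =====
-- Pre_ excludes inputs where the DFS from root can touch an edge endpoint that is not a declared
-- node: there Python A raises KeyError, or returns dicts whose key sets are accidental (parent
-- silently gains undeclared keys that the other three dicts lack). Kept: every input whose root
-- is on no edge (the DFS visits nothing) and every input whose edge endpoints are all declared.
-- (The Lean equality below is in fact proved without using Pre_: both ports map Python's
-- KeyError to the same dedicated value, so they agree everywhere; Pre_ is only needed because
-- the Python programs raise rather than return outside it.)
def Pre_build_pseudotree (nodes : List Int) (edges : List (Int × Int)) (root : Int) : Prop :=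
  (∀ uv ∈ edges, root ≠ uv.1 ∧ root ≠ uv.2) ∨ (∀ uv ∈ edges, uv.1 ∈ nodes ∧ uv.2 ∈ nodes)
instance (nodes : List Int) (edges : List (Int × Int)) (root : Int) : Decidable (Pre_build_pseudotree nodes edges root) := by unfold Pre_build_pseudotree; infer_instance
def pvWitness_build_pseudotree : List Int × (List (Int × Int)) × Int := ([0, 1, 2], [(0, 1), (1, 2), (2, 0)], 0)

def Spec_build_pseudotree (nodes : List Int) (edges : List (Int × Int)) (root : Int) (out : (List (Int × Option Int)) × (List (Int × List Int)) × (List (Int × List Int)) × (List (Int × List Int))) : Prop := out = build_pseudotree_alt nodes edges root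
instance (nodes : List Int) (edges : List (Int × Int)) (root : Int) (out : (List (Int × Option Int)) × (List (Int × List Int)) × (List (Int × List Int)) × (List (Int × List Int))) : Decidable (Spec_build_pseudotree nodes edges root out) := by unfold Spec_build_pseudotree; infer_instance

-- ===== CLAIM (what is proved, stated in full; the proofs are below) =====
def Claim_equal_build_pseudotree : Prop := ∀ (nodes : List Int) (edges : List (Int × Int)) (root : Int), Dom_build_pseudotree nodes edges root → Pre_build_pseudotree nodes edges root → Spec_build_pseudotree nodes edges root (build_pseudotree nodes edges root)

-- ===== LEMMAS AND PROOFS =====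

-- every neighbour produced by get_neighbors is an endpoint of some edge
lemma mem_get_neighbors {y x : Int} {edges : List (Int × Int)} (h : y ∈ get_neighbors x edges) :
    ∃ uv ∈ edges, y = uv.1 ∨ y = uv.2 := by
  have key : ∀ (es : List (Int × Int)) (acc : List Int),
      y ∈ es.foldl (fun nbrs uv =>
        if uv.1 = x then nbrs ++ [uv.2]
        else if uv.2 = x then nbrs ++ [uv.1]
        else nbrs) acc → y ∈ acc ∨ ∃ uv ∈ es, y = uv.1 ∨ y = uv.2 := by
    intro es
    induction es with
    | nil => intro acc h; exact Or.inl h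
    | cons e es ih =>
      intro acc h
      simp only [List.foldl_cons] at h
      rcases ih _ h with h' | ⟨uv, huv, hy⟩
      · split_ifs at h' with h1 h2
        · rcases List.mem_append.mp h' with h'' | h''
          · exact Or.inl h''
          · exact Or.inr ⟨e, List.mem_cons_self .., Or.inr (by simpa using h'')⟩
        · rcases List.mem_append.mp h' with h'' | h''
          · exact Or.inl h''
          · exact Or.inr ⟨e, List.mem_cons_self .., Or.inl (by simpa using h'')⟩
        · exact Or.inl h'
      · exact Or.inr ⟨uv, List.mem_cons_of_mem _ huv, hy⟩
  rcases key edges [] h with h' | h'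
  · cases h'
  · exact h' 

lemma mem_candidates {edges : List (Int × Int)} {root x y : Int}
    (h : y ∈ get_neighbors x edges) : y ∈ candidates edges root := by
  rcases mem_get_neighbors h with ⟨uv, huv, hy⟩
  unfold candidates
  refine List.mem_cons_of_mem _ (List.mem_flatMap.mpr ⟨uv, huv, ?_⟩)
  rcases hy with h' | h' <;> simp [h']

-- the adjacency index returns exactly get_neighbors, in the same order
lemma adj_getD (edges : List (Int × Int)) (x : Int) :
    (buildAdj edges).getD x [] = get_neighbors x edges := by
  have key : ∀ (es : List (Int × Int)) (d : PySem.Dict Int (List Int)) (acc : List Int),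
      d.getD x [] = acc →
      (es.foldl (fun d uv =>
        let d1 := d.modify uv.1 [] (· ++ [uv.2])
        if uv.2 ≠ uv.1 then d1.modify uv.2 [] (· ++ [uv.1]) else d1) d).getD x [] =
      es.foldl (fun nbrs uv =>
        if uv.1 = x then nbrs ++ [uv.2]
        else if uv.2 = x then nbrs ++ [uv.1]
        else nbrs) acc := by
    intro es
    induction es with
    | nil => intro d acc h; simpa using h
    | cons e es ih =>
      intro d acc h
      simp only [List.foldl_cons]
      apply ih
      by_cases h21 : e.2 = e.1
      · simp only [h21, ne_eq, not_true_eq_false, if_false]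
        by_cases h1x : e.1 = x
        · rw [h1x, PySem.Dict.getD_modify_self, h]; simp [h1x, h21]
        · rw [PySem.Dict.getD_modify_of_ne _ _ _ (fun hx => h1x hx.symm), h]
          simp [h1x, h21]
      · simp only [ne_eq, h21, not_false_iff, if_true]
        by_cases h1x : e.1 = x
        · have h2x : e.2 ≠ x := fun hx => h21 (hx.trans h1x.symm)
          rw [PySem.Dict.getD_modify_of_ne _ _ _ (fun hx => h2x hx.symm), h1x,
            PySem.Dict.getD_modify_self, h]
          simp [h1x, h2x]
        · by_cases h2x : e.2 = x
          · rw [h2x, PySem.Dict.getD_modify_self,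
              PySem.Dict.getD_modify_of_ne _ _ _ (fun hx => h1x hx.symm), h]
            simp [h1x, h2x]
          · rw [PySem.Dict.getD_modify_of_ne _ _ _ (fun hx => h2x hx.symm),
              PySem.Dict.getD_modify_of_ne _ _ _ (fun hx => h1x hx.symm), h]
            simp [h1x, h2x]
  exact key edges PySem.Dict.empty [] rfl


lemma dfsA_zero (edges : List (Int × Int)) (u : Int) (p : Option Int) (S : PTSt) :
    dfsA edges 0 u p S = none := by rw [dfsA.eq_def]

lemma dfsA_succ (edges : List (Int × Int)) (g : Nat) (u : Int) (p : Option Int) (S : PTSt) :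
    dfsA edges (g + 1) u p S =
      (let S1 : PTSt := { S with vis := S.vis.add u }
       match p with
       | none => loopA edges g u p (get_neighbors u edges) S1
       | some pv =>
         let S2 : PTSt := { S1 with par := S1.par.insert u (some pv) }
         match S2.chl.get? pv with
         | none => some none
         | some l => loopA edges g u p (get_neighbors u edges) { S2 with chl := S2.chl.insert pv (l ++ [u]) }) := by
  rw [dfsA.eq_def]

-- visited only grows through dfsA/loopA
lemma mono_loopA_of (edges : List (Int × Int)) (g : Nat)
    (hd : ∀ u p S S', dfsA edges g u p S = some (some S') → ∀ x, x ∈ S.vis → x ∈ S'.vis) :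
    ∀ (vs : List Int) (u : Int) (p : Option Int) (S S' : PTSt),
      loopA edges g u p vs S = some (some S') → ∀ x, x ∈ S.vis → x ∈ S'.vis := by
  intro vs
  induction vs with
  | nil =>
    intro u p S S' hl x hx
    simp only [loopA] at hl
    cases hl; exact hx
  | cons v vs ih =>
    intro u p S S' hl x hx
    simp only [loopA] at hl
    by_cases h1 : some v = p
    · rw [if_pos h1] at hl; exact ih _ _ _ _ hl x hx
    · rw [if_neg h1] at hl
      by_cases h2 : S.vis.contains v
      · rw [if_pos h2] at hl
        cases hpp : S.pp.get? u with
        | none => rw [hpp] at hl; simp at hl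
        | some l =>
          simp only [hpp] at hl
          by_cases h3 : v ∈ l
          · rw [if_pos h3] at hl; exact ih _ _ _ _ hl x hx
          · rw [if_neg h3] at hl
            cases hpc : S.pc.get? v with
            | none => simp only [hpc] at hl; simp at hl
            | some m => simp only [hpc] at hl; exact ih _ _ _ _ hl x hx
      · rw [if_neg h2] at hl
        cases hd' : dfsA edges g v (some u) S with
        | none => simp only [hd'] at hl; simp at hl
        | some w =>
          cases w with
          | none => simp only [hd'] at hl; simp at hl
          | some S1 =>
            simp only [hd'] at hl
            exact ih _ _ _ _ hl x (hd v (some u) S S1 hd' x hx)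

lemma mono_dfsA (edges : List (Int × Int)) :
    ∀ (g : Nat) (u : Int) (p : Option Int) (S S' : PTSt),
      dfsA edges g u p S = some (some S') → ∀ x, x ∈ S.vis → x ∈ S'.vis := by
  intro g
  induction g with
  | zero => intro u p S S' h; rw [dfsA_zero] at h; cases h
  | succ g ih =>
    intro u p S S' h x hx
    rw [dfsA_succ] at h; simp only [] at h
    have hx1 : x ∈ S.vis.add u := (PySem.Set.mem_add _ _ _).mpr (Or.inl hx)
    cases p with
    | none => exact mono_loopA_of edges g ih _ _ _ _ _ h x hx1
    | some pv =>
      cases hc : S.chl.get? pv with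
      | none => simp only [hc] at h; exact absurd h (by simp)
      | some l => simp only [hc] at h; exact mono_loopA_of edges g ih _ _ _ _ _ h x hx1

lemma freshCount_le (cands : List Int) {vis vis' : PySem.Set Int}
    (h : ∀ x, x ∈ vis → x ∈ vis') : freshCount cands vis' ≤ freshCount cands vis := by
  apply List.countP_mono_left
  intro x _ hx
  simp only [decide_eq_true_eq] at hx ⊢
  exact fun hmem => hx (h x hmem)

-- the fuel in build_pseudotree is sufficient: dfsA never returns the fuel-exhausted outer none
lemma suff_loop_of (edges : List (Int × Int)) (cands : List Int) (g : Nat)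
    (hd : ∀ u p S, u ∈ cands → (u ∉ S.vis) → freshCount cands S.vis ≤ g → dfsA edges g u p S ≠ none) :
    ∀ (vs : List Int) (u : Int) (p : Option Int) (S : PTSt),
      (∀ x ∈ vs, x ∈ cands) → freshCount cands S.vis ≤ g → loopA edges g u p vs S ≠ none := by
  intro vs
  induction vs with
  | nil => intro u p S _ _; simp [loopA]
  | cons v vs ih =>
    intro u p S hsub hcnt
    have hsub' : ∀ x ∈ vs, x ∈ cands := fun x hx => hsub x (List.mem_cons_of_mem _ hx)
    simp only [loopA]
    by_cases h1 : some v = p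
    · rw [if_pos h1]; exact ih u p S hsub' hcnt
    · rw [if_neg h1]
      by_cases h2 : S.vis.contains v
      · rw [if_pos h2]
        cases hpp : S.pp.get? u with
        | none => simp
        | some l =>
          simp only []
          by_cases h3 : v ∈ l
          · rw [if_pos h3]; exact ih u p S hsub' hcnt
          · rw [if_neg h3]
            cases hpc : S.pc.get? v with
            | none => simp
            | some m => exact ih u p _ hsub' hcnt
      · rw [if_neg h2]
        have hvfresh : v ∉ S.vis := by simp [PySem.Set.contains] at h2; exact h2
        have hne := hd v (some u) S (hsub v (List.mem_cons_self ..)) hvfresh hcnt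
        cases hd' : dfsA edges g v (some u) S with
        | none => exact absurd hd' hne
        | some w =>
          cases w with
          | none => simp
          | some S1 =>
            have hmono := mono_dfsA edges g v (some u) S S1 hd'
            exact ih u p S1 hsub' (le_trans (freshCount_le cands hmono) hcnt)

lemma suff_dfsA (edges : List (Int × Int)) (cands : List Int)
    (hcl : ∀ x y : Int, y ∈ get_neighbors x edges → y ∈ cands) :
    ∀ (g : Nat) (u : Int) (p : Option Int) (S : PTSt),
      u ∈ cands → (u ∉ S.vis) → freshCount cands S.vis ≤ g → dfsA edges g u p S ≠ none := by
  intro g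
  induction g with
  | zero =>
    intro u p S hu hfresh hcnt
    exfalso
    have : 0 < freshCount cands S.vis :=
      List.countP_pos_iff.mpr ⟨u, hu, by simp [hfresh]⟩
    omega
  | succ g ih =>
    intro u p S hu hfresh hcnt
    have hlt : freshCount cands (S.vis.add u) < freshCount cands S.vis :=
      freshCount_add_lt cands S.vis u hu hfresh
    rw [dfsA_succ]; simp only []
    cases p with
    | none =>
      exact suff_loop_of edges cands g ih _ _ _ _ (fun x hx => hcl u x hx) (by show freshCount cands (S.vis.add u) ≤ g; omega)
    | some pv =>
      cases hc : S.chl.get? pv with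
      | none => simp [hc]
      | some l =>
        simp only [hc]
        exact suff_loop_of edges cands g ih _ _ _ _ (fun x hx => hcl u x hx) (by show freshCount cands (S.vis.add u) ≤ g; omega)


lemma runB_nil (edges : List (Int × Int)) (cands : List Int) (S : PTSt) :
    runB edges cands [] S = some S := by rw [runB.eq_def]

lemma runB_pop (edges : List (Int × Int)) (cands : List Int) (u : Int) (p : Option Int)
    (rest : List (Int × Option Int × List Int)) (S : PTSt) :
    runB edges cands ((u, p, []) :: rest) S = runB edges cands rest S := by rw [runB.eq_def]

lemma runB_cons (edges : List (Int × Int)) (cands : List Int) (u : Int) (p : Option Int)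
    (v : Int) (vs' : List Int) (rest : List (Int × Option Int × List Int)) (S : PTSt) :
    runB edges cands ((u, p, v :: vs') :: rest) S =
      (if some v = p then runB edges cands ((u, p, vs') :: rest) S
       else if S.vis.contains v then
         match S.pp.get? u with
         | none => none
         | some l =>
           if v ∈ l then runB edges cands ((u, p, vs') :: rest) S
           else
             match S.pc.get? v with
             | none => none
             | some m => runB edges cands ((u, p, vs') :: rest) { S with pp := S.pp.insert u (l ++ [v]), pc := S.pc.insert v (m ++ [u]) }
       else if hv : v ∈ cands then
         let S1 : PTSt := { S with vis := S.vis.add v }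
         let S2 : PTSt := { S1 with par := S1.par.insert v (some u) }
         match S2.chl.get? u with
         | none => none
         | some l => runB edges cands ((v, some u, (buildAdj edges).getD v []) :: (u, p, vs') :: rest) { S2 with chl := S2.chl.insert u (l ++ [v]) }
       else runB edges cands ((u, p, vs') :: rest) S) := by rw [runB.eq_def]

-- the simulation: B's stack machine runs A's recursion
lemma sim_loop (edges : List (Int × Int)) (root : Int) :
    ∀ (g : Nat) (vs : List Int) (u : Int) (p : Option Int) (S : PTSt)
      (rest : List (Int × Option Int × List Int)) (r : Option PTSt),
      (∀ x ∈ vs, x ∈ candidates edges root) →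
      loopA edges g u p vs S = some r →
      runB edges (candidates edges root) ((u, p, vs) :: rest) S =
        (match r with
         | none => none
         | some S' => runB edges (candidates edges root) rest S') := by
  intro g
  induction g using Nat.strong_induction_on with
  | _ g IHg =>
    intro vs
    induction vs with
    | nil =>
      intro u p S rest r hsub hl
      simp only [loopA] at hl
      cases hl
      rw [runB_pop]
    | cons v vs' IHvs =>
      intro u p S rest r hsub hl
      have hsub' : ∀ x ∈ vs', x ∈ candidates edges root :=
        fun x hx => hsub x (List.mem_cons_of_mem _ hx)
      have hvmem : v ∈ candidates edges root := hsub v (List.mem_cons_self ..)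
      simp only [loopA] at hl
      rw [runB_cons]
      by_cases h1 : some v = p
      · rw [if_pos h1] at hl ⊢
        exact IHvs u p S rest r hsub' hl
      · rw [if_neg h1] at hl ⊢
        by_cases h2 : S.vis.contains v
        · rw [if_pos h2] at hl ⊢
          cases hpp : S.pp.get? u with
          | none => simp only [hpp] at hl ⊢; cases hl; rfl
          | some l =>
            simp only [hpp] at hl ⊢
            by_cases h3 : v ∈ l
            · rw [if_pos h3] at hl ⊢
              exact IHvs u p S rest r hsub' hl
            · rw [if_neg h3] at hl ⊢
              cases hpc : S.pc.get? v with
              | none => simp only [hpc] at hl ⊢; cases hl; rfl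
              | some m =>
                simp only [hpc] at hl ⊢
                exact IHvs u p _ rest r hsub' hl
        · rw [if_neg h2] at hl ⊢
          rw [dif_pos hvmem]
          cases g with
          | zero =>
            rw [dfsA_zero] at hl
            exact absurd hl (by simp)
          | succ g' =>
            rw [dfsA_succ] at hl
            simp only [] at hl
            cases hc : S.chl.get? u with
            | none => simp only [hc] at hl ⊢; cases hl; rfl
            | some l =>
              simp only [hc] at hl ⊢
              rw [adj_getD]
              cases hw : loopA edges g' v (some u) (get_neighbors v edges)
                  { par := S.par.insert v (some u), chl := S.chl.insert u (l ++ [v]),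
                    pp := S.pp, pc := S.pc, vis := S.vis.add v } with
              | none =>
                rw [hw] at hl
                exact absurd hl (by simp)
              | some w =>
                have hpush := IHg g' (Nat.lt_succ_self g') (get_neighbors v edges) v (some u) _
                  ((u, p, vs') :: rest) w (fun x hx => mem_candidates hx) hw
                rw [hw] at hl
                cases w with
                | none =>
                  cases hl
                  exact hpush
                | some S1 =>
                  rw [hpush]
                  exact IHvs u p S1 rest r hsub' hl

lemma main_eq (nodes : List Int) (edges : List (Int × Int)) (root : Int) :
    build_pseudotree nodes edges root = build_pseudotree_alt nodes edges root := by
  have hflat : (edges.flatMap (fun uv => [uv.1, uv.2])).length = 2 * edges.length := by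
    induction edges with
    | nil => simp
    | cons e es ih =>
      simp only [List.flatMap_cons, List.length_append, List.length_cons, List.length_nil, ih]
      omega
  have hcnt0 : freshCount (candidates edges root) PySem.Set.empty ≤ nodes.length + 2 * edges.length + 1 := by
    have h1 : freshCount (candidates edges root) PySem.Set.empty ≤ (candidates edges root).length :=
      List.countP_le_length
    have h2 : (candidates edges root).length = (edges.flatMap (fun uv => [uv.1, uv.2])).length + 1 := by
      simp [candidates]
    omega
  have hroot : root ∈ candidates edges root := List.mem_cons_self ..
  have hfresh : root ∉ (PySem.Set.empty : PySem.Set Int) := List.not_mem_nil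
  have hne := suff_dfsA edges (candidates edges root) (fun x y h => mem_candidates h)
    (nodes.length + 2 * edges.length + 1) root none
    ⟨nodes.foldl (fun d n => d.insert n none) PySem.Dict.empty,
     nodes.foldl (fun d n => d.insert n []) PySem.Dict.empty,
     nodes.foldl (fun d n => d.insert n []) PySem.Dict.empty,
     nodes.foldl (fun d n => d.insert n []) PySem.Dict.empty, PySem.Set.empty⟩
    hroot hfresh hcnt0
  obtain ⟨w, hw⟩ := Option.ne_none_iff_exists'.mp hne
  have hw' : loopA edges (nodes.length + 2 * edges.length) root none (get_neighbors root edges)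
      ⟨nodes.foldl (fun d n => d.insert n none) PySem.Dict.empty,
       nodes.foldl (fun d n => d.insert n []) PySem.Dict.empty,
       nodes.foldl (fun d n => d.insert n []) PySem.Dict.empty,
       nodes.foldl (fun d n => d.insert n []) PySem.Dict.empty, PySem.Set.ofList [root]⟩ = some w := by
    rw [dfsA_succ] at hw
    exact hw
  have hsim := sim_loop edges root (nodes.length + 2 * edges.length) (get_neighbors root edges)
    root none _ [] w (fun x hx => mem_candidates hx) hw'
  simp only [build_pseudotree, build_pseudotree_alt]
  rw [hw, adj_getD, hsim]
  cases w with
  | none => rfl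
  | some S' =>
    have hx : (match (some S' : Option PTSt) with
               | none => none
               | some S'' => runB edges (candidates edges root) [] S'') = some S' :=
      runB_nil edges (candidates edges root) S'
    rw [hx]

-- ===== VERDICT (by name: the statement is the Claim_ definition above) =====
theorem build_pseudotree_spec : Claim_equal_build_pseudotree := by
  unfold Claim_equal_build_pseudotree
  intro nodes edges root _ _
  unfold Spec_build_pseudotree
  exact main_eq nodes edges root
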